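-- pv_equiv track=rewrite | github.com/DragunWF/Competitive-Programming | CodeWars/python/7_kyu/zero_balanced_array.py | is_zero_balanced
-- ===== SOURCE A (Python) =====
-- from collections import Counter
--
-- def is_zero_balanced(arr: list[str]) -> bool:
--     if not arr:
--         return False
--     counter = Counter(arr)
--     for num in counter:
--         if counter[num] != counter[invert_num(num)]:
--             return False
--     return True
--
-- def invert_num(num: int) -> int:
--     return -num if num > 0 else abs(num)
-- ===== SOURCE B (Python) =====
-- def is_zero_balanced(arr: list) -> bool:
--     if not arr:
--         return False
--     return sorted(arr) == sorted(-x for x in arr)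
-- ===== Notes on version B (the rewrite author's own statement) =====
-- stated objective: simpler
-- what changed: Replaces the Counter build plus per-key count-vs-negated-count loop by a single multiset comparison: sorted(arr) == sorted(-x for x in arr), exploiting that invert_num is plain negation.
import Mathlib
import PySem

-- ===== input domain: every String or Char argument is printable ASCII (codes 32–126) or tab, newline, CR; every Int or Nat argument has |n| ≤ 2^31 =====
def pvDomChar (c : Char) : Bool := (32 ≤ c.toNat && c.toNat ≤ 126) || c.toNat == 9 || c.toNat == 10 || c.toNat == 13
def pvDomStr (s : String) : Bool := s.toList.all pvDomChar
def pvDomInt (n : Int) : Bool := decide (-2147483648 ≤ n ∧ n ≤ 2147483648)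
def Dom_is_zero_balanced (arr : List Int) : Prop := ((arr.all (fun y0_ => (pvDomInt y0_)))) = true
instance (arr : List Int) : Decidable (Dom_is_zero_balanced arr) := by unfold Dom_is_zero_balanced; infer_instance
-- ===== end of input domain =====

-- B replaces A's Counter and per-key loop by one multiset comparison (sorted(arr) == sorted(-x for x in arr)); objective: simpler.

-- ===== PORT A =====
def invert_num (num : Int) : Int := if num > 0 then -num else |num|

-- the 'for num in counter' loop with its early 'return False'
def izbLoopA (counter : PySem.Dict Int Int) : List Int → Bool
  | [] => true
  | k :: rest =>
      if counter.getD k 0 ≠ counter.getD (invert_num k) 0 then false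
      else izbLoopA counter rest

def is_zero_balanced (arr : List Int) : Bool :=
  if arr = [] then false
  else
    let counter := PySem.Dict.counter arr
    izbLoopA counter counter.keys

-- ===== PORT B =====
def is_zero_balanced_alt (arr : List Int) : Bool :=
  if arr = [] then false
  else PySem.List.sorted arr (fun x => x) false
         == PySem.List.sorted (arr.map (fun x => -x)) (fun x => x) false

-- ===== PRECONDITION & SPEC =====
def Spec_is_zero_balanced (arr : List Int) (out : Bool) : Prop := out = is_zero_balanced_alt arr
instance (arr : List Int) (out : Bool) : Decidable (Spec_is_zero_balanced arr out) := by unfold Spec_is_zero_balanced; infer_instance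

-- ===== CLAIM (what is proved, stated in full; the proofs are below) =====
def Claim_equal_is_zero_balanced : Prop := ∀ (arr : List Int), Dom_is_zero_balanced arr → Spec_is_zero_balanced arr (is_zero_balanced arr)

-- ===== LEMMAS AND PROOFS =====

theorem invert_num_eq_neg (k : Int) : invert_num k = -k := by
  unfold invert_num; split
  · rfl
  · exact abs_of_nonpos (by omega)

theorem izbLoopA_eq_all (c : PySem.Dict Int Int) (ks : List Int) :
    izbLoopA c ks = ks.all (fun k => c.getD k 0 == c.getD (invert_num k) 0) := by
  induction ks with
  | nil => rfl
  | cons k rest ih =>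
      simp only [izbLoopA, List.all_cons]
      split <;> simp_all

theorem izbA_iff (arr : List Int) :
    izbLoopA (PySem.Dict.counter arr) (PySem.Dict.counter arr).keys = true ↔
      ∀ k ∈ arr, arr.count k = arr.count (-k) := by
  rw [izbLoopA_eq_all]
  simp only [List.all_eq_true, beq_iff_eq, PySem.Dict.getD_counter, invert_num_eq_neg,
    PySem.Dict.keys_counter]
  constructor
  · intro h k hk
    have := h k (by simpa [PySem.Set.mem_ofList] using hk)
    exact_mod_cast this
  · intro h k hk
    have := h k (by simpa [PySem.Set.mem_ofList] using hk)
    exact_mod_cast this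

theorem perm_neg_iff (arr : List Int) :
    arr.Perm (arr.map (fun x => -x)) ↔ ∀ k ∈ arr, arr.count k = arr.count (-k) := by
  rw [List.perm_iff_count]
  have hmap : ∀ k : Int, (arr.map (fun x => -x)).count k = arr.count (-k) := by
    intro k
    have := List.count_map_of_injective arr Neg.neg neg_injective (-k)
    simpa using this
  constructor
  · intro h k _
    have := h (-k)
    rw [hmap, neg_neg] at this
    exact this.symm
  · intro h k
    rw [hmap]
    by_cases hkk : k ∈ arr
    · exact h k hkk
    · rw [List.count_eq_zero_of_not_mem hkk]
      by_cases hnk : (-k) ∈ arr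
      · have h1 := h (-k) hnk
        rw [neg_neg, List.count_eq_zero_of_not_mem hkk] at h1
        exact h1.symm
      · rw [List.count_eq_zero_of_not_mem hnk]

-- ===== VERDICT (by name: the statement is the Claim_ definition above) =====
theorem is_zero_balanced_spec : Claim_equal_is_zero_balanced := by
  intro arr _
  unfold Spec_is_zero_balanced is_zero_balanced is_zero_balanced_alt
  by_cases h : arr = []
  · simp [h]
  · simp only [h, if_false]
    rw [Bool.eq_iff_iff, izbA_iff, beq_iff_eq,
      PySem.List.sorted_id_eq_sorted_id_iff_perm, perm_neg_iff]
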